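-- pv_equiv track=rewrite | github.com/dgwamna44/eXeMpLify-Music-Analyzer | analyzers/tempo_duration/tempo/helpers.py | _step_distance_to_mark
-- ===== SOURCE A (Python) =====
-- VALID_TEMPOS = [
--     40, 42, 44, 46, 48, 50, 52, 54, 56, 58, 60,
--     63, 66, 69, 72, 76, 80, 84, 88, 92, 96,
--     100, 104, 108, 112, 116, 120, 126, 132, 138,
--     144, 152, 160, 168, 176, 184, 200, 208,
-- ]
--
-- def _step_distance_to_mark(bpm: int) -> int:
--     if bpm in VALID_TEMPOS:
--         return 0
--     lower = [t for t in VALID_TEMPOS if t <= bpm]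
--     upper = [t for t in VALID_TEMPOS if t >= bpm]
--     if not lower:
--         return max(1, VALID_TEMPOS.index(upper[0]))
--     if not upper:
--         return max(1, len(VALID_TEMPOS) - 1 - VALID_TEMPOS.index(lower[-1]))
--     lower_idx = VALID_TEMPOS.index(lower[-1])
--     upper_idx = VALID_TEMPOS.index(upper[0])
--     return max(1, min(upper_idx - lower_idx, lower_idx - upper_idx) or 1)
-- ===== SOURCE B (Python) =====
-- def _step_distance_to_mark(bpm: int) -> int:
--     # A always returns 0 for a valid tempo mark and 1 otherwise; the set of marks
--     # is characterised arithmetically (intervals with fixed step moduli), so no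
--     # list, no .index, no distance arithmetic is needed.
--     is_mark = (
--         (40 <= bpm <= 60 and bpm % 2 == 0)
--         or (63 <= bpm <= 72 and bpm % 3 == 0)
--         or (72 <= bpm <= 120 and bpm % 4 == 0)
--         or (120 <= bpm <= 144 and bpm % 6 == 0)
--         or (144 <= bpm <= 184 and bpm % 8 == 0)
--         or bpm == 200
--         or bpm == 208
--     )
--     return 0 if is_mark else 1
-- ===== Notes on version B (the rewrite author's own statement) =====
-- stated objective: alternative
-- what changed: A's list-building, .index lookups and min/max arithmetic always collapse to 1 for any non-member bpm, so B replaces the whole computation by a closed-form arithmetic membership test (interval bounds plus step moduli), using no list at all.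
import Mathlib
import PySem

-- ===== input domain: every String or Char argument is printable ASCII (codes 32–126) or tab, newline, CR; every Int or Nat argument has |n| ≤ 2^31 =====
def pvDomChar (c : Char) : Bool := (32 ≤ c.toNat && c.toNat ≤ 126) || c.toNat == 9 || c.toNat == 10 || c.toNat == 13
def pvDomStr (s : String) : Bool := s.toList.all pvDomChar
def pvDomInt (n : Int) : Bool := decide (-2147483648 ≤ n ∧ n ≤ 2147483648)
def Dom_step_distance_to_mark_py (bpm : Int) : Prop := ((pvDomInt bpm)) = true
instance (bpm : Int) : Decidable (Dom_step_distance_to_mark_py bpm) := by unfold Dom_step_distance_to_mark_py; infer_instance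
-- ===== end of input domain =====

-- B replaces A's list passes, .index lookups and min/max arithmetic (which always
-- collapse to 1 for non-member bpm) by a closed-form arithmetic membership test
-- (interval bounds plus step moduli) using no list at all.

-- ===== PORT A =====
def VALID_TEMPOS : List Int :=
  [40, 42, 44, 46, 48, 50, 52, 54, 56, 58, 60,
   63, 66, 69, 72, 76, 80, 84, 88, 92, 96,
   100, 104, 108, 112, 116, 120, 126, 132, 138,
   144, 152, 160, 168, 176, 184, 200, 208]

def step_distance_to_mark_py (bpm : Int) : Int :=
  if bpm ∈ VALID_TEMPOS then 0
  else
    let lower := VALID_TEMPOS.filter (fun t => t ≤ bpm)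
    let upper := VALID_TEMPOS.filter (fun t => bpm ≤ t)
    if lower = [] then
      -- upper[0] and .index cannot fail here (lower empty ⇒ upper = VALID_TEMPOS ≠ []);
      -- the .getD 0 defaults are unreachable
      max 1 (((PySem.List.pyGet? upper 0).bind
        (fun x => PySem.List.index? VALID_TEMPOS x)).getD 0 : Int)
    else if upper = [] then
      max 1 ((VALID_TEMPOS.length : Int) - 1 -
        (((PySem.List.pyGet? lower (-1)).bind
          (fun x => PySem.List.index? VALID_TEMPOS x)).getD 0 : Int))
    else
      let lower_idx : Int := (((PySem.List.pyGet? lower (-1)).bind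
        (fun x => PySem.List.index? VALID_TEMPOS x)).getD 0 : Int)
      let upper_idx : Int := (((PySem.List.pyGet? upper 0).bind
        (fun x => PySem.List.index? VALID_TEMPOS x)).getD 0 : Int)
      let m : Int := min (upper_idx - lower_idx) (lower_idx - upper_idx)
      max 1 (if m = 0 then 1 else m)   -- Python's `m or 1`

-- ===== PORT B =====
def step_distance_to_mark_py_alt (bpm : Int) : Int :=
  if (40 ≤ bpm ∧ bpm ≤ 60 ∧ bpm % 2 = 0)
     ∨ (63 ≤ bpm ∧ bpm ≤ 72 ∧ bpm % 3 = 0)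
     ∨ (72 ≤ bpm ∧ bpm ≤ 120 ∧ bpm % 4 = 0)
     ∨ (120 ≤ bpm ∧ bpm ≤ 144 ∧ bpm % 6 = 0)
     ∨ (144 ≤ bpm ∧ bpm ≤ 184 ∧ bpm % 8 = 0)
     ∨ bpm = 200 ∨ bpm = 208
  then 0 else 1

-- ===== PRECONDITION & SPEC =====
def Spec_step_distance_to_mark_py (bpm : Int) (out : Int) : Prop := out = step_distance_to_mark_py_alt bpm
instance (bpm : Int) (out : Int) : Decidable (Spec_step_distance_to_mark_py bpm out) := by unfold Spec_step_distance_to_mark_py; infer_instance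

-- ===== CLAIM (what is proved, stated in full; the proofs are below) =====
def Claim_equal_step_distance_to_mark_py : Prop := ∀ (bpm : Int), Dom_step_distance_to_mark_py bpm → Spec_step_distance_to_mark_py bpm (step_distance_to_mark_py bpm)

-- ===== LEMMAS AND PROOFS =====

-- B's arithmetic condition characterises membership in VALID_TEMPOS
theorem mark_iff (bpm : Int) :
    ((40 ≤ bpm ∧ bpm ≤ 60 ∧ bpm % 2 = 0)
     ∨ (63 ≤ bpm ∧ bpm ≤ 72 ∧ bpm % 3 = 0)
     ∨ (72 ≤ bpm ∧ bpm ≤ 120 ∧ bpm % 4 = 0)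
     ∨ (120 ≤ bpm ∧ bpm ≤ 144 ∧ bpm % 6 = 0)
     ∨ (144 ≤ bpm ∧ bpm ≤ 184 ∧ bpm % 8 = 0)
     ∨ bpm = 200 ∨ bpm = 208) ↔ bpm ∈ VALID_TEMPOS := by
  simp only [VALID_TEMPOS, List.mem_cons, List.not_mem_nil, or_false]
  omega

-- below the smallest mark: lower is empty, upper is all of VALID_TEMPOS
theorem low_case (bpm : Int) (h : bpm < 40) : step_distance_to_mark_py bpm = 1 := by
  have hnm : bpm ∉ VALID_TEMPOS := by
    intro hm; simp [VALID_TEMPOS] at hm; omega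
  have hl : VALID_TEMPOS.filter (fun t => t ≤ bpm) = [] := by
    rw [List.filter_eq_nil_iff]
    intro a ha; simp [VALID_TEMPOS] at ha ⊢; omega
  have hu : VALID_TEMPOS.filter (fun t => bpm ≤ t) = VALID_TEMPOS := by
    rw [List.filter_eq_self]
    intro a ha; simp [VALID_TEMPOS] at ha ⊢; omega
  simp only [step_distance_to_mark_py, hl, hu, if_neg hnm]
  decide

-- above the largest mark: upper is empty, lower is all of VALID_TEMPOS
theorem high_case (bpm : Int) (h : 208 < bpm) : step_distance_to_mark_py bpm = 1 := by
  have hnm : bpm ∉ VALID_TEMPOS := by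
    intro hm; simp [VALID_TEMPOS] at hm; omega
  have hu : VALID_TEMPOS.filter (fun t => bpm ≤ t) = [] := by
    rw [List.filter_eq_nil_iff]
    intro a ha; simp [VALID_TEMPOS] at ha ⊢; omega
  have hl : VALID_TEMPOS.filter (fun t => t ≤ bpm) = VALID_TEMPOS := by
    rw [List.filter_eq_self]
    intro a ha; simp [VALID_TEMPOS] at ha ⊢; omega
  have hlne : VALID_TEMPOS ≠ ([] : List Int) := by decide
  simp only [step_distance_to_mark_py, hl, hu, if_neg hnm, if_neg hlne]
  decide

-- A returns 1 on every non-member input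
theorem nonmem_case (bpm : Int) (h : bpm ∉ VALID_TEMPOS) :
    step_distance_to_mark_py bpm = 1 := by
  by_cases h40 : bpm < 40
  · exact low_case bpm h40
  · by_cases h208 : 208 < bpm
    · exact high_case bpm h208
    · -- middle: both filters are nonempty, and min (u-l) (l-u) ≤ 0 forces the result to 1
      have hlne : VALID_TEMPOS.filter (fun t => t ≤ bpm) ≠ [] := by
        intro he
        have h40m : (40 : Int) ∈ VALID_TEMPOS.filter (fun t => t ≤ bpm) := by
          rw [List.mem_filter]
          exact ⟨by decide, by simpa using by omega⟩
        rw [he] at h40m; exact absurd h40m (List.not_mem_nil)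
      have hune : VALID_TEMPOS.filter (fun t => bpm ≤ t) ≠ [] := by
        intro he
        have h208m : (208 : Int) ∈ VALID_TEMPOS.filter (fun t => bpm ≤ t) := by
          rw [List.mem_filter]
          exact ⟨by decide, by simpa using by omega⟩
        rw [he] at h208m; exact absurd h208m (List.not_mem_nil)
      simp only [step_distance_to_mark_py, if_neg h, if_neg hlne, if_neg hune]
      generalize (((PySem.List.pyGet? (VALID_TEMPOS.filter (fun t => t ≤ bpm)) (-1)).bind
        (fun x => PySem.List.index? VALID_TEMPOS x)).getD 0 : Int) = li
      generalize (((PySem.List.pyGet? (VALID_TEMPOS.filter (fun t => bpm ≤ t)) 0).bind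
        (fun x => PySem.List.index? VALID_TEMPOS x)).getD 0 : Int) = ui
      split_ifs <;> omega

-- ===== VERDICT (by name: the statement is the Claim_ definition above) =====
theorem step_distance_to_mark_py_spec : Claim_equal_step_distance_to_mark_py := by
  intro bpm _
  unfold Spec_step_distance_to_mark_py step_distance_to_mark_py_alt
  by_cases hm : bpm ∈ VALID_TEMPOS
  · rw [if_pos ((mark_iff bpm).mpr hm)]
    simp [step_distance_to_mark_py, hm]
  · rw [if_neg (fun hc => hm ((mark_iff bpm).mp hc))]
    exact nonmem_case bpm hm
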